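-- pv_equiv track=rewrite | github.com/SweetTownConqueror/bgs_tests_exterminisher | v2/main.py | extract_reference_from_textimage
-- ===== SOURCE A (Python) =====
-- def can_convert_to_int(string):
--     try:
--         int(string)
--         return True
--     except ValueError:
--         return False
--
-- def extract_reference_from_textimage(string):
--     reference = ""
--     for s in string:
--         if can_convert_to_int(s):
--             reference = reference + s
--         if s == "S":
--             break
--     return reference
-- ===== SOURCE B (Python) =====
-- def can_convert_to_int(string):
--     try:
--         int(string)
--         return True
--     except ValueError:
--         return False
--
-- def extract_reference_from_textimage(string):
--     # Right-to-left scan: a 'S' resets the accumulator, so after the whole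
--     # pass the accumulator holds exactly the digits before the FIRST 'S'.
--     acc = []
--     for c in reversed(string):
--         if c == "S":
--             acc.clear()
--         elif can_convert_to_int(c):
--             acc.append(c)
--     return "".join(reversed(acc))
-- ===== Notes on version B (the rewrite author's own statement) =====
-- stated objective: alternative
-- what changed: B scans the string right-to-left with an accumulator that is reset whenever 'S' is seen (so the surviving contents are the digits before the first 'S'), then reverses; A scans left-to-right collecting digits and breaking at 'S'.
import Mathlib
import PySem

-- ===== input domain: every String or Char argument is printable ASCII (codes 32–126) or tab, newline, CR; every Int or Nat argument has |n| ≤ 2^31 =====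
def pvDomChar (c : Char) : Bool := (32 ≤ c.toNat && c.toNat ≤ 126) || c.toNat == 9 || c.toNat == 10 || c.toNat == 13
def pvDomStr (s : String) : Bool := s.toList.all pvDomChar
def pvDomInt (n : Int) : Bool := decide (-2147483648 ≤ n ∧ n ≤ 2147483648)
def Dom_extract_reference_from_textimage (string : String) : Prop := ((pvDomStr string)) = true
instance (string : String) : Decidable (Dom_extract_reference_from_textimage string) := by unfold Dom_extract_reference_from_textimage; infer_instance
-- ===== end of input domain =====

-- B scans right-to-left with a reset-on-'S' accumulator instead of A's collect-and-break loop (same cost, different traversal).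

-- ===== PORT A =====
-- can_convert_to_int(c): int(c) succeeds ↔ PySem.Int.ofChars? returns some (exact)
def pvCanConvert (c : Char) : Bool := (PySem.Int.ofChars? [c]).isSome

-- A's for-loop with its accumulator and break, as structural recursion
def pvLoopA : List Char → List Char → List Char
  | acc, [] => acc
  | acc, c :: rest =>
    let acc' := if pvCanConvert c then acc ++ [c] else acc
    if c = 'S' then acc' else pvLoopA acc' rest

def extract_reference_from_textimage (string : String) : String :=
  String.ofList (pvLoopA [] string.toList)

-- ===== PORT B =====
-- one step of B's loop body (over the reversed character sequence)
def pvStepB (acc : List Char) (c : Char) : List Char :=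
  if c = 'S' then [] else if pvCanConvert c then acc ++ [c] else acc

def extract_reference_from_textimage_alt (string : String) : String :=
  String.ofList ((string.toList.reverse.foldl pvStepB []).reverse)

-- ===== PRECONDITION & SPEC =====
def Spec_extract_reference_from_textimage (string : String) (out : String) : Prop := out = extract_reference_from_textimage_alt string
instance (string : String) (out : String) : Decidable (Spec_extract_reference_from_textimage string out) := by unfold Spec_extract_reference_from_textimage; infer_instance

-- ===== CLAIM (what is proved, stated in full; the proofs are below) =====
def Claim_equal_extract_reference_from_textimage : Prop := ∀ (string : String), Dom_extract_reference_from_textimage string → Spec_extract_reference_from_textimage string (extract_reference_from_textimage string)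

-- ===== LEMMAS AND PROOFS =====
theorem pvCanConvert_S : pvCanConvert 'S' = false := by decide

theorem pvLoopA_eq (l acc : List Char) :
    pvLoopA acc l = acc ++ (l.takeWhile (fun c => c ≠ 'S')).filter pvCanConvert := by
  induction l generalizing acc with
  | nil => simp [pvLoopA]
  | cons c rest ih =>
    by_cases hS : c = 'S'
    · subst hS
      simp [pvLoopA, pvCanConvert_S, List.takeWhile]
    · simp only [pvLoopA, if_neg hS, ih]
      rw [List.takeWhile_cons_of_pos (by simp [hS])]
      by_cases hc : pvCanConvert c <;> simp [hc]

theorem pvLoopB_eq (l acc : List Char) :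
    (l.reverse.foldl pvStepB acc).reverse
      = (l.takeWhile (fun c => c ≠ 'S')).filter pvCanConvert
        ++ (if 'S' ∈ l then [] else acc.reverse) := by
  induction l with
  | nil => simp
  | cons c rest ih =>
    simp only [List.reverse_cons, List.foldl_append, List.foldl_cons, List.foldl_nil]
    by_cases hS : c = 'S'
    · subst hS
      simp [pvStepB, List.takeWhile]
    · rw [List.takeWhile_cons_of_pos (by simp [hS])]
      have hm : ('S' ∈ c :: rest) ↔ ('S' ∈ rest) := by
        constructor
        · intro h
          rcases List.mem_cons.mp h with h | h
          · exact absurd h.symm hS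
          · exact h
        · exact List.mem_cons_of_mem _
      by_cases hc : pvCanConvert c
      · rw [pvStepB, if_neg hS, if_pos hc, List.reverse_append, ih,
          List.filter_cons_of_pos hc]
        simp [hm]
      · rw [pvStepB, if_neg hS, if_neg hc, ih,
          List.filter_cons_of_neg (by simpa using hc)]
        simp [hm]

-- ===== VERDICT (by name: the statement is the Claim_ definition above) =====
theorem extract_reference_from_textimage_spec : Claim_equal_extract_reference_from_textimage := by
  intro s _
  unfold Spec_extract_reference_from_textimage extract_reference_from_textimage
    extract_reference_from_textimage_alt
  rw [pvLoopA_eq, pvLoopB_eq]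
  split <;> simp
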